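-- pv_equiv track=rewrite | github.com/theonataf/anagram | matching_words.py | swipping_first_with_second
-- ===== SOURCE A (Python) =====
-- def swipping_first_with_second(word_to_swipe):
--     list_of_letters = []
--     list_of_new_letters = []
--     i = len(word_to_swipe)
--     new_word = ""
--     num = 1
--     for letters in word_to_swipe:
--         list_of_letters.append(letters)
--     letter_to_save = list_of_letters[0]
--     while num < i:
--         list_of_new_letters.append(list_of_letters[num])
--         num += 1
--     list_of_new_letters.append(letter_to_save)
--     for letter in list_of_new_letters:
--         new_word += letter
--     return new_word
-- ===== SOURCE B (Python) =====
-- def swipping_first_with_second(word_to_swipe):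
--     return word_to_swipe[1:] + word_to_swipe[0]
-- ===== Notes on version B (the rewrite author's own statement) =====
-- stated objective: simpler
-- what changed: Replaces the list-building loop, index-driven while loop and char-by-char string concatenation with a single slice expression word[1:] + word[0].
import Mathlib
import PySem

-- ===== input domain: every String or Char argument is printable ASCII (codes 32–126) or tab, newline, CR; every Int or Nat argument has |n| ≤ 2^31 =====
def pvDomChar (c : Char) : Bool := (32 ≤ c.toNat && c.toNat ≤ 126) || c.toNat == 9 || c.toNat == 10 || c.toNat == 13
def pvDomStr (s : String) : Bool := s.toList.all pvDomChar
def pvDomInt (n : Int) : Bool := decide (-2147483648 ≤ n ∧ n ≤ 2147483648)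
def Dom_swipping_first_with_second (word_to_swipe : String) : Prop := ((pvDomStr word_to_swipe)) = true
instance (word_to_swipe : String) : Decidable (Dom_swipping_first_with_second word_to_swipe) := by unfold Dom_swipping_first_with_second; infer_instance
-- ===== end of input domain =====

-- B replaces A's list-building loop, while loop and char-by-char concatenation with the single slice expression word[1:] + word[0] (simpler).


-- ===== PORT A =====
-- the 'while num < i' loop: fuel = number of remaining iterations (i - num)
def pvWhileA (lol : List Char) (fuel : Nat) (num : Int) (acc : List Char) : List Char :=
  match fuel with
  | 0 => acc
  | f + 1 => pvWhileA lol f (num + 1) (acc ++ [PySem.List.pyGetD lol num ' '])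

def swipping_first_with_second (word_to_swipe : String) : String :=
  let list_of_letters : List Char := word_to_swipe.toList.foldl (fun acc c => acc ++ [c]) []
  let i : Int := PySem.Str.len word_to_swipe
  let letter_to_save : Char := PySem.List.pyGetD list_of_letters 0 ' '   -- [0]: IndexError on "" is excluded by Pre_
  let list_of_new_letters : List Char := pvWhileA list_of_letters (i - 1).toNat 1 []
  let list_of_new_letters := list_of_new_letters ++ [letter_to_save]
  String.ofList (list_of_new_letters.foldl (fun s c => s ++ [c]) [])

-- ===== PORT B =====
def swipping_first_with_second_alt (word_to_swipe : String) : String :=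
  String.ofList (PySem.List.slice word_to_swipe.toList (some 1) none
    ++ [PySem.List.pyGetD word_to_swipe.toList 0 ' '])   -- word[1:] + word[0]; [0] on "" raises, excluded by Pre_

-- ===== PRECONDITION & SPEC =====
-- A (and B) raise IndexError on the empty string (word[0]); Pre_ excludes exactly that input.
def Pre_swipping_first_with_second (word_to_swipe : String) : Prop := word_to_swipe ≠ ""
instance (word_to_swipe : String) : Decidable (Pre_swipping_first_with_second word_to_swipe) := by unfold Pre_swipping_first_with_second; infer_instance
def pvWitness_swipping_first_with_second : String := "ab"
def Spec_swipping_first_with_second (word_to_swipe : String) (out : String) : Prop := out = swipping_first_with_second_alt word_to_swipe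
instance (word_to_swipe : String) (out : String) : Decidable (Spec_swipping_first_with_second word_to_swipe out) := by unfold Spec_swipping_first_with_second; infer_instance

-- ===== CLAIM (what is proved, stated in full; the proofs are below) =====
def Claim_equal_swipping_first_with_second : Prop := ∀ (word_to_swipe : String), Dom_swipping_first_with_second word_to_swipe → Pre_swipping_first_with_second word_to_swipe → Spec_swipping_first_with_second word_to_swipe (swipping_first_with_second word_to_swipe)

-- ===== LEMMAS AND PROOFS =====
lemma pvWhileA_spec : ∀ (post pre acc : List Char),
    pvWhileA (pre ++ post) post.length (pre.length : Int) acc = acc ++ post := by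
  intro post
  induction post with
  | nil => intro pre acc; simp [pvWhileA]
  | cons x xs ih =>
    intro pre acc
    have h1 : pre ++ x :: xs = (pre ++ [x]) ++ xs := by simp
    have h2 : (pre.length : Int) + 1 = ((pre ++ [x]).length : Int) := by
      simp
    simp only [pvWhileA, List.length_cons]
    rw [show PySem.List.pyGetD (pre ++ x :: xs) (pre.length : Int) ' ' = x by
          simp]
    rw [h1, h2, ih]
    simp

theorem swipping_first_with_second_spec : Claim_equal_swipping_first_with_second := by
  intro w _ hpre
  unfold Spec_swipping_first_with_second swipping_first_with_second swipping_first_with_second_alt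
  obtain ⟨c, cs, hw⟩ : ∃ c cs, w.toList = c :: cs := by
    cases h : w.toList with
    | nil => exact absurd (String.toList_eq_nil_iff.mp h) hpre
    | cons c cs => exact ⟨c, cs, rfl⟩
  simp only [hw, PySem.List.foldl_append_singleton_eq_self, List.nil_append,
    PySem.Str.len_eq, List.length_cons, PySem.List.pyGetD_zero_cons,
    PySem.List.slice_from_one, List.tail_cons]
  rw [show ((((cs.length + 1 : Nat)) : Int) - 1).toNat = cs.length by omega]
  have := pvWhileA_spec cs [c] []
  norm_num at this
  rw [this]
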